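-- pv_equiv track=rewrite | github.com/thin2/work2025_5 | 10/2.py | process_pile
-- ===== SOURCE A (Python) =====
-- target = [0, 8, 16, 24]
--
-- def process_pile(pile):
--     flipped = pile[::-1]
--     remaining = []
--     removed = []
--     found = False
--     for card in flipped:
--         if not found:
--             if card in target:
--                 found = True
--                 remaining.append(card)
--             else:
--                 removed.append(card)
--         else:
--             remaining.append(card)
--     return remaining[::-1], removed
-- ===== SOURCE B (Python) =====
-- target = [0, 8, 16, 24]
--
-- def process_pile(pile):
--     removed = []
--     for i in range(len(pile) - 1, -1, -1):
--         if pile[i] in target: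
--             return pile[:i + 1], removed
--         removed.append(pile[i])
--     return [], removed
-- ===== Notes on version B (the rewrite author's own statement) =====
-- stated objective: simpler
-- what changed: B scans the pile backward by index with an early return, taking the remaining part as a single slice pile[:i+1], instead of A's reversed copy, found flag, element-by-element rebuild of remaining and final second reversal.
import Mathlib
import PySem

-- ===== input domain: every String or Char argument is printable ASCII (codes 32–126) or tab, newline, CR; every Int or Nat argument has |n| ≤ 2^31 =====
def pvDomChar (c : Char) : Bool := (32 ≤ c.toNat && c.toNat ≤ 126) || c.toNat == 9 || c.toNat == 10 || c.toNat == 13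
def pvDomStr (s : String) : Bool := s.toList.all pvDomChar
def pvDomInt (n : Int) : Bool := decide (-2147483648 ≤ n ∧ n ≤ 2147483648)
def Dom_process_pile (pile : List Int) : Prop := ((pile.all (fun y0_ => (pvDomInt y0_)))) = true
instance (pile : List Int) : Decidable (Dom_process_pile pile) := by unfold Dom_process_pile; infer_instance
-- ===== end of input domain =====

-- B is simpler: one backward index scan with an early return and a single slice,
-- instead of A's reversed copy, found flag, per-element rebuild and second reversal.

-- ===== PORT A =====
def pvTarget : List Int := [0, 8, 16, 24]

-- the loop body of A, over state (remaining, removed, found)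
def pvAStep (s : List Int × List Int × Bool) (card : Int) : List Int × List Int × Bool :=
  if !s.2.2 then
    if card ∈ pvTarget then (s.1 ++ [card], s.2.1, true)
    else (s.1, s.2.1 ++ [card], false)
  else (s.1 ++ [card], s.2.1, s.2.2)

def process_pile (pile : List Int) : List Int × List Int :=
  let flipped := pile.reverse
  let st := flipped.foldl pvAStep ([], [], false)
  (st.1.reverse, st.2.1)

-- ===== PORT B =====
-- backward index loop: k = i + 1, i the current index; pile[i] is always in range
def pvBGo (pile : List Int) : Nat → List Int → List Int × List Int
  | 0, removed => ([], removed)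
  | k + 1, removed =>
    let card := pile.getD k 0
    if card ∈ pvTarget then (pile.take (k + 1), removed)
    else pvBGo pile k (removed ++ [card])

def process_pile_alt (pile : List Int) : List Int × List Int :=
  pvBGo pile pile.length []

-- ===== PRECONDITION & SPEC =====
def Spec_process_pile (pile : List Int) (out : List Int × List Int) : Prop := out = process_pile_alt pile
instance (pile : List Int) (out : List Int × List Int) : Decidable (Spec_process_pile pile out) := by unfold Spec_process_pile; infer_instance

-- ===== CLAIM (what is proved, stated in full; the proofs are below) =====
def Claim_equal_process_pile : Prop := ∀ (pile : List Int), Dom_process_pile pile → Spec_process_pile pile (process_pile pile)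

-- ===== LEMMAS AND PROOFS =====

-- once found, A's loop only appends to remaining
theorem pvAStep_found (l rem rm : List Int) :
    l.foldl pvAStep (rem, rm, true) = (rem ++ l, rm, true) := by
  induction l generalizing rem with
  | nil => simp
  | cons c t ih => simp [pvAStep, ih]

theorem pvMain (pile : List Int) (k : Nat) (hk : k ≤ pile.length) (rm : List Int) :
    (((pile.take k).reverse.foldl pvAStep ([], rm, false)).1.reverse,
     ((pile.take k).reverse.foldl pvAStep ([], rm, false)).2.1) = pvBGo pile k rm := by
  induction k generalizing rm with
  | zero => simp [pvBGo]
  | succ k ih =>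
    have hklt : k < pile.length := hk
    have htake : (pile.take (k + 1)).reverse = pile[k]?.getD 0 :: (pile.take k).reverse := by
      rw [List.take_succ]
      simp [List.getElem?_eq_getElem hklt]
    rw [htake]
    simp only [List.foldl_cons]
    by_cases hmem : pile[k]?.getD 0 ∈ pvTarget
    · rw [show pvAStep ([], rm, false) (pile[k]?.getD 0) = ([pile[k]?.getD 0], rm, true) from by
        simp [pvAStep, hmem]]
      rw [pvAStep_found]
      have hrev := congrArg List.reverse htake
      simp only [List.reverse_reverse] at hrev
      simp [pvBGo, hmem, hrev]
    · rw [show pvAStep ([], rm, false) (pile[k]?.getD 0) = ([], rm ++ [pile[k]?.getD 0], false) from by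
        simp [pvAStep, hmem]]
      rw [ih (Nat.le_of_lt hklt)]
      simp [pvBGo, hmem]

-- ===== VERDICT (by name: the statement is the Claim_ definition above) =====
theorem process_pile_spec : Claim_equal_process_pile := by
  intro pile _
  unfold Spec_process_pile process_pile process_pile_alt
  have := pvMain pile pile.length (le_refl _) []
  simpa using this
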